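-- pv_equiv track=rewrite | github.com/YukiTbst/WPA_oil_tank | 上位机/WPA_controller.py | check_str_cal
-- ===== SOURCE A (Python) =====
-- def check_str_cal(cmd_str: str):
--     check_num=0
--     for i in range(len(cmd_str)):
--         if cmd_str[i]>='A' and cmd_str[i]<='z':
--             check_num+=1
--         elif cmd_str[i]>='0' and cmd_str[i]<='9':
--             check_num-=1
--         else:
--             check_num+=2
--     return "~"+str(check_num)+"\n"
-- ===== SOURCE B (Python) =====
-- def check_str_cal(cmd_str: str):
--     n = len(cmd_str)
--     letters = sum(1 for c in cmd_str if 'A' <= c <= 'z')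
--     digits = sum(1 for c in cmd_str if '0' <= c <= '9')
--     return "~" + str(2 * n - letters - 3 * digits) + "\n"
-- ===== Notes on version B (the rewrite author's own statement) =====
-- stated objective: alternative
-- what changed: Replaces the single classifying accumulator loop by two category counts (letters in 'A'..'z', digits) plus the closed form 2*n - letters - 3*digits.
import Mathlib
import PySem

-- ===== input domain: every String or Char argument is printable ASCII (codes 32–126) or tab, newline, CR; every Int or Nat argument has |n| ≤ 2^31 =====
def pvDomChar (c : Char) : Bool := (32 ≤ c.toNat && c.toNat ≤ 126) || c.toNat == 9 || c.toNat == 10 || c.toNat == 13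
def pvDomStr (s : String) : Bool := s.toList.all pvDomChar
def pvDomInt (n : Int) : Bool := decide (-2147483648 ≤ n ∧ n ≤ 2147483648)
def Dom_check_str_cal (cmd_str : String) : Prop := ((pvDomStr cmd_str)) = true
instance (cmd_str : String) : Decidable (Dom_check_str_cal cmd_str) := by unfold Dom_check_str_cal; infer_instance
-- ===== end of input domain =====

-- B computes the same checksum via two category counts and a closed form instead of one classifying accumulator loop (alternative decomposition, same cost).
-- ===== PORT A =====
def check_str_cal (cmd_str : String) : String :=
  let check_num : Int := cmd_str.toList.foldl (fun acc c =>
    if 'A' ≤ c ∧ c ≤ 'z' then acc + 1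
    else if '0' ≤ c ∧ c ≤ '9' then acc - 1
    else acc + 2) 0
  "~" ++ PySem.Int.toStr check_num ++ "\n"

-- ===== PORT B =====
def check_str_cal_alt (cmd_str : String) : String :=
  let n : Int := cmd_str.toList.length
  let letters : Int := cmd_str.toList.countP (fun c => decide ('A' ≤ c ∧ c ≤ 'z'))
  let digits : Int := cmd_str.toList.countP (fun c => decide ('0' ≤ c ∧ c ≤ '9'))
  "~" ++ PySem.Int.toStr (2 * n - letters - 3 * digits) ++ "\n"

-- ===== PRECONDITION & SPEC =====
def Spec_check_str_cal (cmd_str : String) (out : String) : Prop := out = check_str_cal_alt cmd_str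
instance (cmd_str : String) (out : String) : Decidable (Spec_check_str_cal cmd_str out) := by unfold Spec_check_str_cal; infer_instance

-- ===== CLAIM (what is proved, stated in full; the proofs are below) =====
def Claim_equal_check_str_cal : Prop := ∀ (cmd_str : String), Dom_check_str_cal cmd_str → Spec_check_str_cal cmd_str (check_str_cal cmd_str)

-- ===== LEMMAS AND PROOFS =====
-- A's accumulator equals the closed form over category counts.
lemma checksum_foldl (l : List Char) (k : Int) :
    l.foldl (fun acc c =>
      if 'A' ≤ c ∧ c ≤ 'z' then acc + 1
      else if '0' ≤ c ∧ c ≤ '9' then acc - 1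
      else acc + 2) k
    = k + 2 * (l.length : Int)
        - (l.countP (fun c => decide ('A' ≤ c ∧ c ≤ 'z')) : Int)
        - 3 * (l.countP (fun c => decide ('0' ≤ c ∧ c ≤ '9')) : Int) := by
  induction l generalizing k with
  | nil => simp
  | cons c t ih =>
    simp only [List.foldl_cons, List.length_cons, List.countP_cons, ih]
    by_cases h1 : 'A' ≤ c ∧ c ≤ 'z' <;> by_cases h2 : '0' ≤ c ∧ c ≤ '9'
    · exact absurd (le_trans h1.1 h2.2) (by decide)
    all_goals simp [h1, h2]; ring

-- ===== VERDICT (by name: the statement is the Claim_ definition above) =====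
theorem check_str_cal_spec : Claim_equal_check_str_cal := by
  intro cmd_str _
  unfold Spec_check_str_cal check_str_cal check_str_cal_alt
  rw [checksum_foldl cmd_str.toList 0]
  ring_nf
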